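-- pv_equiv track=rewrite | github.com/gagandeep44489/DiscreteStrucutreAndAlgoApp | Divide and Conquer Algorithm Trainer.py | binary_search_trace
-- ===== SOURCE A (Python) =====
-- def binary_search_trace(arr, target):
--     trace = ["BINARY SEARCH TRACE", f"Array: {arr}", f"Target: {target}", ""]
--     low, high = 0, len(arr) - 1
--     step = 1
--
--     while low <= high:
--         mid = (low + high) // 2
--         trace.append(
--             f"Step {step}: low={low}, high={high}, mid={mid}, arr[mid]={arr[mid]}"
--         )
--         if arr[mid] == target:
--             trace.append(f"Found target {target} at index {mid}.")
--             break
--         if arr[mid] < target: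
--             trace.append(f"{arr[mid]} < {target}, so search right half.")
--             low = mid + 1
--         else:
--             trace.append(f"{arr[mid]} > {target}, so search left half.")
--             high = mid - 1
--         trace.append("")
--         step += 1
--     else:
--         trace.append(f"Target {target} not found.")
--
--     summary = (
--         "Binary Search Summary\n"
--         "- Strategy: Repeatedly cut the search interval in half.\n"
--         "- Requirement: Input must be sorted.\n"
--         "- Time Complexity: O(log n).\n"
--         "- Space Complexity: O(1) for iterative version.\n"
--         "- Typical use: Fast lookups in sorted lists."
--     )
--     return trace, summary
-- ===== SOURCE B (Python) =====
-- # B: two staged passes — pass 1 computes only the visited (low, high) intervals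
-- # and the hit index; pass 2 renders the trace text from that data.
-- def _search(arr, target, low, high):
--     if low > high:
--         return [], None
--     mid = (low + high) // 2
--     if arr[mid] == target:
--         return [(low, high)], mid
--     if arr[mid] < target:
--         states, found = _search(arr, target, mid + 1, high)
--     else:
--         states, found = _search(arr, target, low, mid - 1)
--     return [(low, high)] + states, found
--
--
-- def _render(arr, target, total, found, i, lo, hi):
--     mid = (lo + hi) // 2
--     line = f"Step {i + 1}: low={lo}, high={hi}, mid={mid}, arr[mid]={arr[mid]}"
--     if i + 1 == total and found is not None:
--         return [line, f"Found target {target} at index {mid}."]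
--     if arr[mid] < target:
--         return [line, f"{arr[mid]} < {target}, so search right half.", ""]
--     return [line, f"{arr[mid]} > {target}, so search left half.", ""]
--
--
-- def binary_search_trace(arr, target):
--     states, found = _search(arr, target, 0, len(arr) - 1)
--     trace = ["BINARY SEARCH TRACE", f"Array: {arr}", f"Target: {target}", ""]
--     for i, (lo, hi) in enumerate(states):
--         trace += _render(arr, target, len(states), found, i, lo, hi)
--     if found is None:
--         trace.append(f"Target {target} not found.")
--     summary = (
--         "Binary Search Summary\n"
--         "- Strategy: Repeatedly cut the search interval in half.\n"
--         "- Requirement: Input must be sorted.\n"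
--         "- Time Complexity: O(log n).\n"
--         "- Space Complexity: O(1) for iterative version.\n"
--         "- Typical use: Fast lookups in sorted lists."
--     )
--     return trace, summary
-- ===== Notes on version B (the rewrite author's own statement) =====
-- stated objective: alternative
-- what changed: Splits A's single trace-building while/else loop into two staged passes: a recursive search first records only the visited (low, high) intervals and the hit index, then a separate rendering pass maps each recorded interval to its trace lines.
import Mathlib
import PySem

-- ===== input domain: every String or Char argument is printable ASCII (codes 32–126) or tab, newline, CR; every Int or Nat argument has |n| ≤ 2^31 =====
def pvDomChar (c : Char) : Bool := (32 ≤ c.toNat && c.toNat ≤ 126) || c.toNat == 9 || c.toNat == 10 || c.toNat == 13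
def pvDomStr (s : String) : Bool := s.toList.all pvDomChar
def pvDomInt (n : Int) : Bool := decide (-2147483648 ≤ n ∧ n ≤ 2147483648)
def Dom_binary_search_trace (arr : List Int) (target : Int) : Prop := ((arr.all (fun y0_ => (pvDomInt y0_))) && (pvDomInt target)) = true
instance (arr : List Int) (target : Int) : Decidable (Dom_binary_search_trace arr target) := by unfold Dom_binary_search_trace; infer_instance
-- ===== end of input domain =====

-- B replaces A's single trace-building while/else loop by two staged passes:
-- the search records only the visited (low, high) intervals and the hit index,
-- and a separate pass renders the trace lines from that record.

-- shared string formatting (both Pythons use identical f-strings)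
def pvListRepr (arr : List Int) : String :=
  "[" ++ String.intercalate ", " (arr.map PySem.Int.toStr) ++ "]"

def pvHeader (arr : List Int) (target : Int) : List String :=
  ["BINARY SEARCH TRACE", "Array: " ++ pvListRepr arr,
   "Target: " ++ PySem.Int.toStr target, ""]

def pvStepLine (low high mid v : Int) (step : Int) : String :=
  "Step " ++ PySem.Int.toStr step ++ ": low=" ++ PySem.Int.toStr low ++
  ", high=" ++ PySem.Int.toStr high ++ ", mid=" ++ PySem.Int.toStr mid ++
  ", arr[mid]=" ++ PySem.Int.toStr v

def pvSummary : String :=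
  "Binary Search Summary\n- Strategy: Repeatedly cut the search interval in half.\n- Requirement: Input must be sorted.\n- Time Complexity: O(log n).\n- Space Complexity: O(1) for iterative version.\n- Typical use: Fast lookups in sorted lists."

-- ===== PORT A =====
-- the while/else loop, threading the growing trace list through the iterations.
-- arr[mid] is in range on every reachable state (0 ≤ low ≤ mid ≤ high < len),
-- so pyGetD's default is never used and the port is exact.
def bstLoopA (arr : List Int) (target : Int) (trace : List String)
    (low high step : Int) : List String :=
  if h : low ≤ high then
    if PySem.List.pyGetD arr (PySem.Int.floordiv (low + high) 2) 0 = target then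
      (trace ++ [pvStepLine low high (PySem.Int.floordiv (low + high) 2) (PySem.List.pyGetD arr (PySem.Int.floordiv (low + high) 2) 0) step]) ++
        ["Found target " ++ PySem.Int.toStr target ++ " at index " ++ PySem.Int.toStr (PySem.Int.floordiv (low + high) 2) ++ "."]
    else if PySem.List.pyGetD arr (PySem.Int.floordiv (low + high) 2) 0 < target then
      bstLoopA arr target
        ((trace ++ [pvStepLine low high (PySem.Int.floordiv (low + high) 2) (PySem.List.pyGetD arr (PySem.Int.floordiv (low + high) 2) 0) step]) ++
          [PySem.Int.toStr (PySem.List.pyGetD arr (PySem.Int.floordiv (low + high) 2) 0) ++ " < " ++ PySem.Int.toStr target ++ ", so search right half.", ""])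
        (PySem.Int.floordiv (low + high) 2 + 1) high (step + 1)
    else
      bstLoopA arr target
        ((trace ++ [pvStepLine low high (PySem.Int.floordiv (low + high) 2) (PySem.List.pyGetD arr (PySem.Int.floordiv (low + high) 2) 0) step]) ++
          [PySem.Int.toStr (PySem.List.pyGetD arr (PySem.Int.floordiv (low + high) 2) 0) ++ " > " ++ PySem.Int.toStr target ++ ", so search left half.", ""])
        low (PySem.Int.floordiv (low + high) 2 - 1) (step + 1)
  else trace ++ ["Target " ++ PySem.Int.toStr target ++ " not found."]
  termination_by (high + 1 - low).toNat
  decreasing_by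
  · have := PySem.Int.floordiv_two_mid_bounds h; omega
  · have := PySem.Int.floordiv_two_mid_bounds h; omega

def binary_search_trace (arr : List Int) (target : Int) : List String × String :=
  (bstLoopA arr target (pvHeader arr target) 0 ((arr.length : Int) - 1) 1, pvSummary)

-- ===== PORT B =====
-- pass 1: the search, recording the interval path and the hit index (if any)
def bstStates (arr : List Int) (target : Int) (low high : Int) :
    List (Int × Int) × Option Int :=
  if h : low ≤ high then
    if PySem.List.pyGetD arr (PySem.Int.floordiv (low + high) 2) 0 = target then
      ([(low, high)], some (PySem.Int.floordiv (low + high) 2))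
    else if PySem.List.pyGetD arr (PySem.Int.floordiv (low + high) 2) 0 < target then
      ((low, high) :: (bstStates arr target (PySem.Int.floordiv (low + high) 2 + 1) high).1,
       (bstStates arr target (PySem.Int.floordiv (low + high) 2 + 1) high).2)
    else
      ((low, high) :: (bstStates arr target low (PySem.Int.floordiv (low + high) 2 - 1)).1,
       (bstStates arr target low (PySem.Int.floordiv (low + high) 2 - 1)).2)
  else ([], none)
  termination_by (high + 1 - low).toNat
  decreasing_by
  · have := PySem.Int.floordiv_two_mid_bounds h; omega
  · have := PySem.Int.floordiv_two_mid_bounds h; omega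

-- pass 2: the lines contributed by one recorded interval (Python _render; mid inlined)
def bstRender (arr : List Int) (target : Int) (total : Nat) (found : Option Int)
    (i lo hi : Int) : List String :=
  if i + 1 = (total : Int) ∧ found.isSome then
    [pvStepLine lo hi (PySem.Int.floordiv (lo + hi) 2) (PySem.List.pyGetD arr (PySem.Int.floordiv (lo + hi) 2) 0) (i + 1),
     "Found target " ++ PySem.Int.toStr target ++ " at index " ++ PySem.Int.toStr (PySem.Int.floordiv (lo + hi) 2) ++ "."]
  else if PySem.List.pyGetD arr (PySem.Int.floordiv (lo + hi) 2) 0 < target then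
    [pvStepLine lo hi (PySem.Int.floordiv (lo + hi) 2) (PySem.List.pyGetD arr (PySem.Int.floordiv (lo + hi) 2) 0) (i + 1),
     PySem.Int.toStr (PySem.List.pyGetD arr (PySem.Int.floordiv (lo + hi) 2) 0) ++ " < " ++ PySem.Int.toStr target ++ ", so search right half.", ""]
  else
    [pvStepLine lo hi (PySem.Int.floordiv (lo + hi) 2) (PySem.List.pyGetD arr (PySem.Int.floordiv (lo + hi) 2) 0) (i + 1),
     PySem.Int.toStr (PySem.List.pyGetD arr (PySem.Int.floordiv (lo + hi) 2) 0) ++ " > " ++ PySem.Int.toStr target ++ ", so search left half.", ""]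

def binary_search_trace_alt (arr : List Int) (target : Int) : List String × String :=
  let r := bstStates arr target 0 ((arr.length : Int) - 1)
  ((PySem.List.enumerate r.1 0).foldl
      (fun acc p => acc ++ bstRender arr target r.1.length r.2 p.1 p.2.1 p.2.2)
      (pvHeader arr target)
    ++ (if r.2.isNone then ["Target " ++ PySem.Int.toStr target ++ " not found."] else []),
   pvSummary)

-- ===== PRECONDITION & SPEC =====
def Spec_binary_search_trace (arr : List Int) (target : Int) (out : List String × String) : Prop := out = binary_search_trace_alt arr target
instance (arr : List Int) (target : Int) (out : List String × String) : Decidable (Spec_binary_search_trace arr target out) := by unfold Spec_binary_search_trace; infer_instance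

-- ===== CLAIM (what is proved, stated in full; the proofs are below) =====
def Claim_equal_binary_search_trace : Prop := ∀ (arr : List Int) (target : Int), Dom_binary_search_trace arr target → Spec_binary_search_trace arr target (binary_search_trace arr target)

-- ===== LEMMAS AND PROOFS =====

-- an empty interval path carries no hit
theorem bstStates_nil_none (arr : List Int) (target : Int) (low high : Int)
    (h : (bstStates arr target low high).1 = []) :
    (bstStates arr target low high).2 = none := by
  fun_induction bstStates arr target low high <;> simp_all

-- A's accumulator loop at step k+1 equals folding the renderer over the
-- recorded path enumerated from k, total being k plus the path length
theorem bstLoopA_eq_fold (arr : List Int) (target : Int) :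
    ∀ (low high : Int) (k total : Nat) (trace : List String),
    total = k + (bstStates arr target low high).1.length →
    bstLoopA arr target trace low high ((k : Int) + 1) =
      (PySem.List.enumerate (bstStates arr target low high).1 (k : Int)).foldl
        (fun acc p => acc ++ bstRender arr target total (bstStates arr target low high).2 p.1 p.2.1 p.2.2)
        trace
      ++ (if (bstStates arr target low high).2.isNone then
            ["Target " ++ PySem.Int.toStr target ++ " not found."] else []) := by
  intro low high
  fun_induction bstStates arr target low high with
  | case1 low high h heq =>
    intro k total trace hT
    simp only [List.length_cons, List.length_nil] at hT
    have hc : ((k : Int) + 1 = (total : Int) ∧ (some (PySem.Int.floordiv (low + high) 2)).isSome) :=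
      ⟨by omega, rfl⟩
    rw [bstLoopA.eq_def]
    simp only [dif_pos h, if_pos heq, PySem.List.enumerate_cons, PySem.List.enumerate_nil,
      List.foldl_cons, List.foldl_nil, bstRender, if_pos hc, Option.isNone_some,
      if_neg Bool.false_ne_true, List.append_assoc, List.cons_append, List.nil_append,
      List.append_nil]
  | case2 low high h heq hlt ih =>
    intro k total trace hT
    simp only [List.length_cons] at hT
    rw [bstLoopA.eq_def]
    simp only [dif_pos h, if_neg heq, if_pos hlt, PySem.List.enumerate_cons, List.foldl_cons]
    have hne : ¬ ((k : Int) + 1 = (total : Int) ∧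
        ((bstStates arr target (PySem.Int.floordiv (low + high) 2 + 1) high).2).isSome = true) := by
      rintro ⟨h1, h2⟩
      rcases hx : (bstStates arr target (PySem.Int.floordiv (low + high) 2 + 1) high).1 with _ | ⟨y, ys⟩
      · rw [bstStates_nil_none arr target _ _ hx] at h2; simp at h2
      · rw [hx] at hT; simp only [List.length_cons] at hT; omega
    have hr : bstRender arr target total
        (bstStates arr target (PySem.Int.floordiv (low + high) 2 + 1) high).2 (k : Int) low high =
        [pvStepLine low high (PySem.Int.floordiv (low + high) 2)
           (PySem.List.pyGetD arr (PySem.Int.floordiv (low + high) 2) 0) ((k : Int) + 1),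
         PySem.Int.toStr (PySem.List.pyGetD arr (PySem.Int.floordiv (low + high) 2) 0) ++
           " < " ++ PySem.Int.toStr target ++ ", so search right half.", ""] := by
      rw [bstRender, if_neg hne, if_pos hlt]
    rw [hr]
    have := ih (k + 1) total
      ((trace ++ [pvStepLine low high (PySem.Int.floordiv (low + high) 2)
           (PySem.List.pyGetD arr (PySem.Int.floordiv (low + high) 2) 0) ((k : Int) + 1)]) ++
        [PySem.Int.toStr (PySem.List.pyGetD arr (PySem.Int.floordiv (low + high) 2) 0) ++
           " < " ++ PySem.Int.toStr target ++ ", so search right half.", ""])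
      (by omega)
    push_cast at this
    simp only [List.append_assoc, List.cons_append, List.nil_append] at this ⊢
    exact this
  | case3 low high h heq hlt ih =>
    intro k total trace hT
    simp only [List.length_cons] at hT
    rw [bstLoopA.eq_def]
    simp only [dif_pos h, if_neg heq, if_neg hlt, PySem.List.enumerate_cons, List.foldl_cons]
    have hne : ¬ ((k : Int) + 1 = (total : Int) ∧
        ((bstStates arr target low (PySem.Int.floordiv (low + high) 2 - 1)).2).isSome = true) := by
      rintro ⟨h1, h2⟩
      rcases hx : (bstStates arr target low (PySem.Int.floordiv (low + high) 2 - 1)).1 with _ | ⟨y, ys⟩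
      · rw [bstStates_nil_none arr target _ _ hx] at h2; simp at h2
      · rw [hx] at hT; simp only [List.length_cons] at hT; omega
    have hr : bstRender arr target total
        (bstStates arr target low (PySem.Int.floordiv (low + high) 2 - 1)).2 (k : Int) low high =
        [pvStepLine low high (PySem.Int.floordiv (low + high) 2)
           (PySem.List.pyGetD arr (PySem.Int.floordiv (low + high) 2) 0) ((k : Int) + 1),
         PySem.Int.toStr (PySem.List.pyGetD arr (PySem.Int.floordiv (low + high) 2) 0) ++
           " > " ++ PySem.Int.toStr target ++ ", so search left half.", ""] := by
      rw [bstRender, if_neg hne, if_neg hlt]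
    rw [hr]
    have := ih (k + 1) total
      ((trace ++ [pvStepLine low high (PySem.Int.floordiv (low + high) 2)
           (PySem.List.pyGetD arr (PySem.Int.floordiv (low + high) 2) 0) ((k : Int) + 1)]) ++
        [PySem.Int.toStr (PySem.List.pyGetD arr (PySem.Int.floordiv (low + high) 2) 0) ++
           " > " ++ PySem.Int.toStr target ++ ", so search left half.", ""])
      (by omega)
    push_cast at this
    simp only [List.append_assoc, List.cons_append, List.nil_append] at this ⊢
    exact this
  | case4 low high h =>
    intro k total trace hT
    rw [bstLoopA.eq_def]
    simp [dif_neg h, PySem.List.enumerate_nil]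

-- ===== VERDICT (by name: the statement is the Claim_ definition above) =====
theorem binary_search_trace_spec : Claim_equal_binary_search_trace := by
  intro arr target _
  unfold Spec_binary_search_trace binary_search_trace binary_search_trace_alt
  have := bstLoopA_eq_fold arr target 0 ((arr.length : Int) - 1) 0
    (bstStates arr target 0 ((arr.length : Int) - 1)).1.length
    (pvHeader arr target) (by omega)
  simp only [Nat.cast_zero, zero_add] at this ⊢
  rw [this]
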